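-- pv_equiv track=rewrite | github.com/keerthy-revuri/Python_learning | problems/strings_problems/Length_of_Largest_substring_between_two_equal_characters.py | largest_substr
-- ===== SOURCE A (Python) =====
-- def largest_substr(str):
--     char_index = {}
--     res = -1
--     for i,char in enumerate(str):
--         if char in char_index:
--             res = max(res, i - char_index[char] -1)
--
--         else:
--             char_index[char] = i
--     return res
-- ===== SOURCE B (Python) =====
-- def largest_substr(str):
--     res = -1
--     for c in dict.fromkeys(str):
--         res = max(res, str.rfind(c) - str.find(c) - 1)
--     return res
-- ===== Notes on version B (the rewrite author's own statement) =====
-- stated objective: alternative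
-- what changed: Replaces A's single pass that builds a first-occurrence dict and updates the max at every repeated character by a loop over the distinct characters that computes str.rfind(c) - str.find(c) - 1 per character via library scans.
import Mathlib
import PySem

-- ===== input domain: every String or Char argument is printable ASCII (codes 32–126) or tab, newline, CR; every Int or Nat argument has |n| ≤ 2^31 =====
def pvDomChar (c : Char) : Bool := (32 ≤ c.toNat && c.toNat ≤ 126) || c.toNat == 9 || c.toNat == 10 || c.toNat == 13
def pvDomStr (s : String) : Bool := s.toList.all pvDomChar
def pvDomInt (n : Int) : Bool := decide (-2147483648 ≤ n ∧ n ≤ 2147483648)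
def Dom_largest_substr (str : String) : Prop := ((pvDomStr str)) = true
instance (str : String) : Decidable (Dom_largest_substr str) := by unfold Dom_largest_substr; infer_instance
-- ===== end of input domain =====

-- B replaces A's single-pass first-occurrence dict by, for each distinct character, a find/rfind scan
-- (last − first − 1), taking the maximum (objective: alternative algorithm, not claimed faster).

-- ===== PORT A =====
-- dict lookup char_index[char] is guarded by 'char in char_index', so getD's default is never used
def largest_substr (str : String) : Int :=
  ((PySem.List.enumerate str.toList 0).foldl
    (fun (st : PySem.Dict Char Int × Int) (p : Int × Char) =>
      if st.1.contains p.2 then (st.1, max st.2 (p.1 - st.1.getD p.2 0 - 1))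
      else (st.1.insert p.2 p.1, st.2))
    (PySem.Dict.empty, -1)).2

-- ===== PORT B =====
def largest_substr_alt (str : String) : Int :=
  (PySem.List.dedup str.toList).foldl
    (fun res c =>
      max res (PySem.Str.rfind str (String.ofList [c]) - PySem.Str.find str (String.ofList [c]) - 1))
    (-1)

-- ===== PRECONDITION & SPEC =====
def Spec_largest_substr (str : String) (out : Int) : Prop := out = largest_substr_alt str
instance (str : String) (out : Int) : Decidable (Spec_largest_substr str out) := by unfold Spec_largest_substr; infer_instance

-- ===== CLAIM (what is proved, stated in full; the proofs are below) =====
def Claim_equal_largest_substr : Prop := ∀ (str : String), Dom_largest_substr str → Spec_largest_substr str (largest_substr str)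

-- ===== LEMMAS AND PROOFS =====

-- first index of c in cs (meaningful when c ∈ cs)
def pvFirst : List Char → Char → Nat
  | [], _ => 0
  | a :: t, c => if a = c then 0 else pvFirst t c + 1

-- last index of c in cs (meaningful when c ∈ cs)
def pvLast (cs : List Char) (c : Char) : Nat :=
  Nat.findGreatest (fun j => cs[j]? = some c) cs.length

-- per-character contribution, and the fold of max over a list of characters
def pvG (cs : List Char) (c : Char) : Int := (pvLast cs c : Int) - (pvFirst cs c : Int) - 1

def pvM (l : List Char) (f : Char → Int) (a : Int) : Int :=
  l.foldl (fun r c => max r (f c)) a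

-- the dict A has built after scanning cs, and the result value after scanning cs
def pvDictOf (cs : List Char) : PySem.Dict Char Int :=
  ⟨(PySem.List.dedup cs).map (fun c => (c, (pvFirst cs c : Int)))⟩

def pvResOf (cs : List Char) : Int := pvM (PySem.List.dedup cs) (pvG cs) (-1)

theorem pvFirst_append_of_mem {cs : List Char} {c : Char} (h : c ∈ cs) (l : List Char) :
    pvFirst (cs ++ l) c = pvFirst cs c := by
  induction cs with
  | nil => simp at h
  | cons a t ih =>
    by_cases hac : a = c
    · simp [pvFirst, hac]
    · rcases List.mem_cons.mp h with rfl | h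
      · exact absurd rfl hac
      · simp [pvFirst, hac, ih h]

theorem pvFirst_append_self {cs : List Char} {x : Char} (h : x ∉ cs) :
    pvFirst (cs ++ [x]) x = cs.length := by
  induction cs with
  | nil => simp [pvFirst]
  | cons a t ih =>
    have hax : a ≠ x := fun he => h (by simp [he])
    simp [pvFirst, hax, ih (fun ht => h (List.mem_cons_of_mem _ ht))]

theorem pvFirst_unique {cs : List Char} {c : Char} {k : Nat}
    (hk : cs[k]? = some c) (hmin : ∀ i < k, cs[i]? ≠ some c) : pvFirst cs c = k := by
  induction cs generalizing k with
  | nil => simp at hk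
  | cons a t ih =>
    cases k with
    | zero => simp_all [pvFirst]
    | succ k =>
      have ha : a ≠ c := by
        have := hmin 0 (Nat.succ_pos _)
        simpa using this
      have : pvFirst t c = k := by
        apply ih (by simpa using hk)
        intro i hi
        have := hmin (i+1) (by omega)
        simpa using this
      simp [pvFirst, ha, this]

theorem pvLast_mem_spec {cs : List Char} {c : Char} (h : c ∈ cs) :
    cs[pvLast cs c]? = some c := by
  obtain ⟨j, hj, hje⟩ := List.getElem_of_mem h
  exact Nat.findGreatest_spec (P := fun j => cs[j]? = some c) (Nat.le_of_lt hj)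
    (by simp [List.getElem?_eq_getElem hj, hje])

theorem pvLast_le (cs : List Char) (c : Char) : pvLast cs c ≤ cs.length :=
  Nat.findGreatest_le _

theorem pvLast_append_self {cs : List Char} (x : Char) :
    pvLast (cs ++ [x]) x = cs.length := by
  have hP : (cs ++ [x])[cs.length]? = some x := by simp
  have h1 : cs.length ≤ pvLast (cs ++ [x]) x :=
    Nat.le_findGreatest (by simp) hP
  have h2 : pvLast (cs ++ [x]) x ≤ cs.length + 1 := by
    simpa using pvLast_le (cs ++ [x]) x
  rcases Nat.lt_or_ge (pvLast (cs ++ [x]) x) (cs.length + 1) with hlt | hge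
  · omega
  · exfalso
    have : (cs ++ [x])[cs.length + 1]? = some x := by
      have : pvLast (cs ++ [x]) x = cs.length + 1 := by omega
      rw [← this]; exact pvLast_mem_spec (by simp)
    simp at this

theorem pvLast_append_of_ne {cs : List Char} {c x : Char} (h : c ∈ cs) (hne : c ≠ x) :
    pvLast (cs ++ [x]) c = pvLast cs c := by
  have hmem : cs[pvLast cs c]? = some c := pvLast_mem_spec h
  have hlt : pvLast cs c < cs.length := by
    by_contra hge
    rw [List.getElem?_eq_none (by omega)] at hmem
    simp at hmem
  apply Nat.le_antisymm
  · -- pvLast (cs++[x]) c ≤ pvLast cs c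
    have hb := pvLast_mem_spec (cs := cs ++ [x]) (c := c) (by simp [h])
    set b := pvLast (cs ++ [x]) c with hbdef
    have hble : b ≤ cs.length + 1 := by simpa using pvLast_le (cs ++ [x]) c
    have hblt : b < cs.length := by
      rcases Nat.lt_or_ge b cs.length with h' | h'
      · exact h'
      · exfalso
        rcases Nat.eq_or_lt_of_le h' with he | hlt'
        · rw [List.getElem?_append_right (by omega), ← he] at hb
          simp at hb
          exact hne hb.symm
        · rw [List.getElem?_eq_none (by simp; omega)] at hb
          simp at hb
    have hbcs : cs[b]? = some c := by
      rw [List.getElem?_append_left hblt] at hb; exact hb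
    exact Nat.le_findGreatest (by omega) hbcs
  · -- pvLast cs c ≤ pvLast (cs++[x]) c
    exact Nat.le_findGreatest (by simp; omega) (by rw [List.getElem?_append_left hlt]; exact hmem)

theorem pvSingleton_isPrefixOf (c : Char) (s : List Char) :
    [c].isPrefixOf s = true ↔ s[0]? = some c := by
  cases s with
  | nil => simp
  | cons a t =>
    simp
    exact eq_comm

theorem pvRfind_go_eq (cs : List Char) (c : Char) (n : Nat) :
    PySem.Chars.rfind.go cs [c] n =
      if ∃ j ≤ n, cs[j]? = some c
      then ((Nat.findGreatest (fun j => cs[j]? = some c) n : Nat) : Int)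
      else -1 := by
  induction n with
  | zero =>
    rw [PySem.Chars.rfind.go]
    by_cases h0 : cs[0]? = some c
    · rw [if_pos ((pvSingleton_isPrefixOf c cs).mpr (by simpa using h0))]
      rw [if_pos ⟨0, le_refl _, h0⟩]
      simp [Nat.findGreatest]
    · rw [if_neg (by rw [pvSingleton_isPrefixOf]; simpa using h0)]
      rw [if_neg (by rintro ⟨j, hj, hcj⟩; interval_cases j; exact h0 hcj)]
  | succ n ih =>
    rw [PySem.Chars.rfind.go]
    have hpre : [c].isPrefixOf (cs.drop (n+1)) = true ↔ cs[n+1]? = some c := by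
      rw [pvSingleton_isPrefixOf]
      simp [List.getElem?_drop]
    by_cases hP : cs[n+1]? = some c
    · rw [if_pos (hpre.mpr hP), if_pos ⟨n+1, le_refl _, hP⟩,
        Nat.findGreatest_succ, if_pos hP]
    · have hiff : (∃ j ≤ n + 1, cs[j]? = some c) ↔ ∃ j ≤ n, cs[j]? = some c := by
        constructor
        · rintro ⟨j, hj, hcj⟩
          rcases Nat.lt_or_ge j (n+1) with h' | h'
          · exact ⟨j, by omega, hcj⟩
          · refine absurd hcj ?_
            have hj' : j = n + 1 := by omega
            rw [hj']
            exact hP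
        · rintro ⟨j, hj, hcj⟩; exact ⟨j, by omega, hcj⟩
      rw [if_neg (by rw [hpre]; exact hP), ih, Nat.findGreatest_succ, if_neg hP]
      simp only [hiff]

theorem pvRfind_singleton {cs : List Char} {c : Char} (h : c ∈ cs) :
    PySem.Chars.rfind cs [c] = (pvLast cs c : Int) := by
  obtain ⟨j, hj, hje⟩ := List.getElem_of_mem h
  rw [PySem.Chars.rfind, pvRfind_go_eq]
  rw [if_pos ⟨j, Nat.le_of_lt hj, by simp [List.getElem?_eq_getElem hj, hje]⟩]
  rfl

theorem pvFind_singleton {cs : List Char} {c : Char} (h : c ∈ cs) :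
    PySem.Chars.find cs [c] = (pvFirst cs c : Int) := by
  have hinf : [c] <:+: cs := (List.singleton_infix_iff c cs).mpr h
  have hnn : 0 ≤ PySem.Chars.find cs [c] := (PySem.Chars.find_nonneg_iff cs [c]).mpr hinf
  obtain ⟨hpre, hmin⟩ := PySem.Chars.find_spec hnn
  set k := (PySem.Chars.find cs [c]).toNat with hk
  have hkc : cs[k]? = some c := by
    rcases hpre with ⟨t, ht⟩
    have h0 : (List.drop k cs)[0]? = some c := by rw [← ht]; rfl
    rw [← Nat.add_zero k, ← List.getElem?_drop]
    exact h0
  have hfk : pvFirst cs c = k := by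
    apply pvFirst_unique hkc
    intro i hi hic
    apply hmin i hi
    have h0 : (List.drop i cs)[0]? = some c := by
      rw [List.getElem?_drop]; simpa using hic
    cases hd : List.drop i cs with
    | nil => rw [hd] at h0; simp at h0
    | cons a t =>
      rw [hd] at h0
      simp at h0
      exact ⟨t, by simp [h0]⟩
  omega

-- pvM facts
theorem pvM_init_le (l : List Char) (f : Char → Int) (a : Int) : a ≤ pvM l f a := by
  induction l generalizing a with
  | nil => simp [pvM]
  | cons c t ih =>
    calc a ≤ max a (f c) := le_max_left _ _
    _ ≤ pvM t f (max a (f c)) := ih _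
    _ = pvM (c :: t) f a := rfl

theorem pvM_max (l : List Char) (f : Char → Int) (a b : Int) :
    pvM l f (max a b) = max (pvM l f a) b := by
  induction l generalizing a with
  | nil => simp [pvM]
  | cons c t ih =>
    show pvM t f (max (max a b) (f c)) = max (pvM t f (max a (f c))) b
    rw [show max (max a b) (f c) = max (max a (f c)) b by omega, ih]

theorem pvM_congr (l : List Char) (f g : Char → Int) (a : Int)
    (h : ∀ c ∈ l, f c = g c) : pvM l f a = pvM l g a := by
  unfold pvM
  exact PySem.List.foldl_congr_mem l _ _ a (fun acc x hx => by rw [h x hx])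

theorem pvM_append_singleton (l : List Char) (f : Char → Int) (a : Int) (x : Char) :
    pvM (l ++ [x]) f a = max (pvM l f a) (f x) := by
  simp [pvM, List.foldl_append]

theorem pvM_update (l : List Char) (f f' : Char → Int) (a : Int) (x : Char)
    (hnd : l.Nodup) (hx : x ∈ l) (hf : ∀ c ∈ l, c ≠ x → f' c = f c) (hle : f x ≤ f' x) :
    pvM l f' a = max (pvM l f a) (f' x) := by
  induction l generalizing a with
  | nil => simp at hx
  | cons h t ih =>
    rcases List.nodup_cons.mp hnd with ⟨hht, hndt⟩
    by_cases hhx : h = x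
    · subst hhx
      have hft : ∀ c ∈ t, f' c = f c := fun c hc => hf c (List.mem_cons_of_mem _ hc)
        (fun he => hht (he ▸ hc))
      show pvM t f' (max a (f' h)) = max (pvM t f (max a (f h))) (f' h)
      rw [pvM_congr t f' f _ hft, pvM_max, pvM_max]
      omega
    · have hxt : x ∈ t := by
        rcases List.mem_cons.mp hx with h' | h'
        · exact absurd h'.symm hhx
        · exact h'
      show pvM t f' (max a (f' h)) = max (pvM t f (max a (f h))) (f' x)
      rw [hf h (List.mem_cons_self) hhx, ih (max a (f h)) hndt hxt
        (fun c hc hcx => hf c (List.mem_cons_of_mem _ hc) hcx)]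

theorem pvDedup_append_singleton (cs : List Char) (x : Char) :
    PySem.List.dedup (cs ++ [x]) =
      if x ∈ cs then PySem.List.dedup cs else PySem.List.dedup cs ++ [x] := by
  simp only [PySem.List.dedup, PySem.Set.ofList_eq_foldl, List.foldl_append, List.foldl_cons,
    List.foldl_nil, PySem.Set.add]
  rw [show (List.foldl PySem.Set.add [] cs).contains x = decide (x ∈ cs) from by
    rw [← PySem.Set.ofList_eq_foldl]; simp [pysem]]
  by_cases h : x ∈ cs <;> simp [h]

theorem pvDictOf_contains (cs : List Char) (x : Char) :
    (pvDictOf cs).contains x = decide (x ∈ cs) := by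
  rw [PySem.Dict.contains_eq_decide_mem_keys]
  simp [pvDictOf, PySem.Dict.keys_mk]

theorem pvDictOf_keys_nodup (cs : List Char) : (pvDictOf cs).keys.Nodup := by
  rw [show (pvDictOf cs).keys = PySem.List.dedup cs from by
    simp [pvDictOf, PySem.Dict.keys_mk, List.map_map, Function.comp_def]]
  exact PySem.List.nodup_dedup cs

theorem pvDictOf_getD {cs : List Char} {x : Char} (h : x ∈ cs) (d0 : Int) :
    (pvDictOf cs).getD x d0 = (pvFirst cs x : Int) := by
  apply PySem.Dict.getD_of_mem_items _ _ (pvDictOf_keys_nodup cs)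
  simp only [pvDictOf]
  exact List.mem_map.mpr ⟨x, (PySem.List.mem_dedup cs x).mpr h, rfl⟩

-- the loop invariant: after scanning cs, A's state is (pvDictOf cs, pvResOf cs)
theorem pvLoopA_eq (cs : List Char) :
    (PySem.List.enumerate cs 0).foldl
      (fun (st : PySem.Dict Char Int × Int) (p : Int × Char) =>
        if st.1.contains p.2 then (st.1, max st.2 (p.1 - st.1.getD p.2 0 - 1))
        else (st.1.insert p.2 p.1, st.2))
      (PySem.Dict.empty, -1) = (pvDictOf cs, pvResOf cs) := by
  induction cs using List.reverseRecOn with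
  | nil =>
    simp [PySem.List.enumerate, pvDictOf, pvResOf, PySem.List.dedup, PySem.Set.ofList, pvM,
      PySem.Dict.empty]
  | append_singleton cs x ih =>
    rw [PySem.List.enumerate_append, List.foldl_append, ih]
    show (if (pvDictOf cs).contains x then _ else _) = _
    rw [pvDictOf_contains]
    by_cases hx : x ∈ cs
    · rw [if_pos (by simp [hx])]
      have hdict : pvDictOf (cs ++ [x]) = pvDictOf cs := by
        simp only [pvDictOf, pvDedup_append_singleton, if_pos hx]
        congr 1
        apply List.map_congr_left
        intro c hc
        rw [pvFirst_append_of_mem ((PySem.List.mem_dedup cs c).mp hc) [x]]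
      have hres : pvResOf (cs ++ [x]) =
          max (pvResOf cs) ((0 + cs.length : Int) - (pvDictOf cs).getD x 0 - 1) := by
        rw [pvDictOf_getD hx 0]
        simp only [pvResOf, pvDedup_append_singleton, if_pos hx]
        rw [pvM_update (PySem.List.dedup cs) (pvG cs) (pvG (cs ++ [x])) (-1) x
          (PySem.List.nodup_dedup cs) ((PySem.List.mem_dedup cs x).mpr hx)
          (fun c hc hcx => by
            have hcmem := (PySem.List.mem_dedup cs c).mp hc
            simp only [pvG]
            rw [pvLast_append_of_ne hcmem hcx, pvFirst_append_of_mem hcmem [x]])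
          (by
            simp only [pvG]
            rw [pvLast_append_self x, pvFirst_append_of_mem hx [x]]
            have := pvLast_le cs x
            omega)]
        simp only [pvG]
        rw [pvLast_append_self x, pvFirst_append_of_mem hx [x]]
        ring_nf
      simp only [hres, hdict]
    · rw [if_neg (by simp [hx])]
      have hcont : (pvDictOf cs).contains x = false := by
        rw [pvDictOf_contains]; simp [hx]
      have hdict : pvDictOf (cs ++ [x]) = (pvDictOf cs).insert x (0 + cs.length) := by
        apply PySem.Dict.ext
        rw [PySem.Dict.items_insert_of_not_contains _ _ hcont]
        simp only [pvDictOf, pvDedup_append_singleton, if_neg hx, List.map_append,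
          List.map_cons, List.map_nil]
        congr 1
        · apply List.map_congr_left
          intro c hc
          rw [pvFirst_append_of_mem ((PySem.List.mem_dedup cs c).mp hc) [x]]
        · rw [pvFirst_append_self hx]
          norm_num
      have hres : pvResOf (cs ++ [x]) = pvResOf cs := by
        simp only [pvResOf, pvDedup_append_singleton, if_neg hx]
        rw [pvM_append_singleton,
          pvM_congr (PySem.List.dedup cs) (pvG (cs ++ [x])) (pvG cs) (-1)
            (fun c hc => by
              have hcmem := (PySem.List.mem_dedup cs c).mp hc
              have hcx : c ≠ x := fun he => hx (he ▸ hcmem)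
              simp only [pvG]
              rw [pvLast_append_of_ne hcmem hcx, pvFirst_append_of_mem hcmem [x]])]
        have hgx : pvG (cs ++ [x]) x = -1 := by
          simp only [pvG]
          rw [pvLast_append_self x, pvFirst_append_self hx]
          ring
        rw [hgx]
        have h1 : (-1 : Int) ≤ pvM (PySem.List.dedup cs) (pvG cs) (-1) := pvM_init_le _ _ _
        omega
      rw [hdict, hres]

-- ===== VERDICT (by name: the statement is the Claim_ definition above) =====
theorem largest_substr_spec : Claim_equal_largest_substr := by
  intro str _
  unfold Spec_largest_substr largest_substr largest_substr_alt
  rw [pvLoopA_eq]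
  show pvResOf str.toList = _
  unfold pvResOf
  apply pvM_congr
  intro c hc
  have hmem : c ∈ str.toList := (PySem.List.mem_dedup _ c).mp hc
  simp only [PySem.Str.rfind_eq, PySem.Str.find_eq]
  rw [String.toList_ofList]
  rw [pvRfind_singleton hmem, pvFind_singleton hmem]
  rfl
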